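-- pv_equiv track=rewrite | github.com/kevinjzheng/Data-Structures | Homework/Homework4/kjz233_hw4_q4.py | list_min
-- ===== SOURCE A (Python) =====
-- def list_min(lst,low,high):
--     if low == high:
--         return lst[low]
--     else:
--         rest = list_min(lst,low+1,high)
--         if lst[low] < rest:
--             return lst[low]
--         return rest
-- ===== SOURCE B (Python) =====
-- def list_min(lst, low, high):
--     best = lst[low]
--     for i in range(low + 1, high + 1):
--         if lst[i] < best:
--             best = lst[i]
--     return best
-- ===== Notes on version B (the rewrite author's own statement) =====
-- stated objective: simpler
-- what changed: Replaces the tail recursion (which builds a chain of pending comparisons and hits the recursion limit on large slices) with an iterative running-minimum scan over range(low+1, high+1).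
import Mathlib
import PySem

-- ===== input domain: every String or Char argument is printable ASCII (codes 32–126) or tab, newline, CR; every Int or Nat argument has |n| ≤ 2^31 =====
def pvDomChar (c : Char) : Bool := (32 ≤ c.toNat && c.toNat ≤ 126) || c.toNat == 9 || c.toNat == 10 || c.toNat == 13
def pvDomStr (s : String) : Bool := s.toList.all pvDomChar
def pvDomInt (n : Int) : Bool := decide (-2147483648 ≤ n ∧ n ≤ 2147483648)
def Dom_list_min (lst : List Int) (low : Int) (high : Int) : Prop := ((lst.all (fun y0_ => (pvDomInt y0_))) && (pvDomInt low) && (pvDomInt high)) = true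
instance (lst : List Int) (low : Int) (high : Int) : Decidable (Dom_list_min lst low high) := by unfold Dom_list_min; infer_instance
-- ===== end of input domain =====

-- B replaces A's tail recursion by an iterative running-minimum scan (same values, O(1) space).

-- ===== PORT A =====
-- fuel = high - low; A recurses on low+1 until low == high (Pre_ guarantees the fuel suffices)
def list_min_go (lst : List Int) (high : Int) (low : Int) (fuel : Nat) : Int :=
  if low = high then PySem.List.pyGetD lst low 0
  else
    match fuel with
    | 0 => 0  -- unreachable under Pre_ (A would recurse forever / raise)
    | Nat.succ m =>
      let rest := list_min_go lst high (low + 1) m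
      if PySem.List.pyGetD lst low 0 < rest then PySem.List.pyGetD lst low 0 else rest
termination_by fuel

def list_min (lst : List Int) (low : Int) (high : Int) : Int :=
  list_min_go lst high low (high - low).toNat

-- ===== PORT B =====
def list_min_alt (lst : List Int) (low : Int) (high : Int) : Int :=
  (PySem.List.pyRange (low + 1) (high + 1) 1).foldl
    (fun best i => if PySem.List.pyGetD lst i 0 < best then PySem.List.pyGetD lst i 0 else best)
    (PySem.List.pyGetD lst low 0)

-- ===== PRECONDITION & SPEC =====
-- Pre_ excludes low > high (A's recursion never terminates: RecursionError) and indices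
-- outside Python's valid range -len..len-1 anywhere in [low, high] (IndexError).
def Pre_list_min (lst : List Int) (low : Int) (high : Int) : Prop :=
  low ≤ high ∧ -(lst.length : Int) ≤ low ∧ high < (lst.length : Int)
instance (lst : List Int) (low : Int) (high : Int) : Decidable (Pre_list_min lst low high) := by
  unfold Pre_list_min; infer_instance

def pvWitness_list_min : List Int × Int × Int := ([3, 1, 2], 0, 2)

def Spec_list_min (lst : List Int) (low : Int) (high : Int) (out : Int) : Prop := out = list_min_alt lst low high
instance (lst : List Int) (low : Int) (high : Int) (out : Int) : Decidable (Spec_list_min lst low high out) := by unfold Spec_list_min; infer_instance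

-- ===== CLAIM (what is proved, stated in full; the proofs are below) =====
def Claim_equal_list_min : Prop := ∀ (lst : List Int) (low : Int) (high : Int), Dom_list_min lst low high → Pre_list_min lst low high → Spec_list_min lst low high (list_min lst low high)

-- ===== LEMMAS AND PROOFS =====

-- pull the first accumulator out of B's running-minimum fold (the step is min)
theorem foldl_min_pull (lst : List Int) (l : List Int) (a b : Int) :
    l.foldl (fun best i => if PySem.List.pyGetD lst i 0 < best then PySem.List.pyGetD lst i 0 else best) (min a b)
      = min a (l.foldl (fun best i => if PySem.List.pyGetD lst i 0 < best then PySem.List.pyGetD lst i 0 else best) b) := by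
  induction l generalizing b with
  | nil => simp
  | cons c t ih =>
    simp only [List.foldl_cons]
    have h1 : (if PySem.List.pyGetD lst c 0 < min a b then PySem.List.pyGetD lst c 0 else min a b)
        = min a (if PySem.List.pyGetD lst c 0 < b then PySem.List.pyGetD lst c 0 else b) := by
      rcases le_total a b with h | h <;> rcases lt_trichotomy (PySem.List.pyGetD lst c 0) b with h2 | h2 <;>
        simp [min_def] <;> split_ifs <;> omega
    rw [h1, ih]

theorem list_min_go_eq (lst : List Int) (high : Int) :
    ∀ (n : Nat) (low : Int), low ≤ high → (high - low).toNat = n →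
      list_min_go lst high low n = list_min_alt lst low high := by
  intro n
  induction n with
  | zero =>
    intro low hle hn
    have : low = high := by omega
    subst this
    rw [list_min_go]
    simp [list_min_alt, PySem.List.pyRange_one_eq_nil (by omega : high + 1 ≤ high + 1)]
  | succ m ih =>
    intro low hle hn
    have hne : low ≠ high := by omega
    have hlt : low + 1 ≤ high := by omega
    rw [list_min_go]
    simp only [hne, if_false]
    rw [ih (low + 1) hlt (by omega)]
    -- B side: range (low+1, high+1) starts with low+1
    unfold list_min_alt
    rw [PySem.List.pyRange_one_cons (by omega : low + 1 < high + 1)]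
    simp only [List.foldl_cons]
    set g := fun i => PySem.List.pyGetD lst i 0 with hg
    have hstep : (if g (low + 1) < g low then g (low + 1) else g low) = min (g low) (g (low + 1)) := by
      rcases lt_trichotomy (g (low + 1)) (g low) with h | h | h <;> simp [min_def] <;> omega
    rw [hstep, foldl_min_pull]
    have hstep2 : ∀ r : Int, (if g low < r then g low else r) = min (g low) r := by
      intro r; rcases lt_trichotomy (g low) r with h | h | h <;> simp [min_def] <;> omega
    rw [hstep2]

-- ===== VERDICT (by name: the statement is the Claim_ definition above) =====
theorem list_min_spec : Claim_equal_list_min := by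
  intro lst low high _ hpre
  unfold Spec_list_min list_min
  exact list_min_go_eq lst high (high - low).toNat low hpre.1 rfl
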